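-- pv_equiv track=rewrite | github.com/guptaskrxl/qdrant_project | hybrid_search_latest.py | simple_stem
-- ===== SOURCE A (Python) =====
-- def simple_stem(word: str) -> str:
--     """Basic stemming when NLTK is not available"""
--     word = word.lower()
--     if len(word) <= 3:
--         return word
--
--     # Handle common suffixes
--     suffixes = [
--         ('ing', 3), ('ed', 2), ('er', 2), ('est', 3),
--         ('ly', 2), ('tion', 4), ('ness', 4), ('ment', 4),
--         ('able', 4), ('ible', 4), ('ful', 3), ('less', 4)
--     ]
--
--     for suffix, min_length in suffixes:
--         if len(word) > min_length and word.endswith(suffix):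
--             return word[:-len(suffix)]
--
--     return word
-- ===== SOURCE B (Python) =====
-- _SUFFIXES = {'ing', 'ed', 'er', 'est', 'ly', 'tion', 'ness', 'ment',
--              'able', 'ible', 'ful', 'less'}
--
-- def simple_stem(word: str) -> str:
--     """Basic stemming when NLTK is not available"""
--     word = word.lower()
--     if len(word) <= 3:
--         return word
--     for k in (4, 3, 2):
--         if len(word) > k and word[-k:] in _SUFFIXES:
--             return word[:-k]
--     return word
-- ===== Notes on version B (the rewrite author's own statement) =====
-- stated objective: idiomatic
-- what changed: Instead of scanning 12 (suffix, min_length) pairs with endswith, B loops over the three distinct suffix lengths in descending order and looks the word's trailing slice up in one suffix set.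
import Mathlib
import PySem

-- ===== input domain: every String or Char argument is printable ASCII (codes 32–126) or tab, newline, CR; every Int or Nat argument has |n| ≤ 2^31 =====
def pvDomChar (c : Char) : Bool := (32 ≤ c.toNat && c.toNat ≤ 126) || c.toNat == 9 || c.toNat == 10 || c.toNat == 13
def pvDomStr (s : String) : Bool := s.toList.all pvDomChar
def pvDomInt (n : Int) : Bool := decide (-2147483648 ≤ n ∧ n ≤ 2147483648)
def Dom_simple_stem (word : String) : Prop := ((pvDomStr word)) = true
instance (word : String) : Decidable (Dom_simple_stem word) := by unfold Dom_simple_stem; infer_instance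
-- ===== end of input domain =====

-- B replaces A's scan of 12 (suffix, min_length) pairs by a loop over the three distinct
-- suffix lengths (4, 3, 2) with a lookup of the word's trailing slice in one suffix set
-- (objective: idiomatic; same observable behaviour, proved below).

-- ===== PORT A =====
-- the 'for suffix, min_length in suffixes' loop with its early return
def pvStemLoopA (w : String) : List (String × Int) → String
  | [] => w
  | (suf, m) :: rest =>
      if decide (m < PySem.Str.len w) && PySem.Str.endswith w suf then
        PySem.Str.slice w none (some (-(PySem.Str.len suf)))
      else pvStemLoopA w rest

def simple_stem (word : String) : String :=
  let w := PySem.Str.lower word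
  if PySem.Str.len w ≤ 3 then w
  else
    pvStemLoopA w
      [("ing", 3), ("ed", 2), ("er", 2), ("est", 3),
       ("ly", 2), ("tion", 4), ("ness", 4), ("ment", 4),
       ("able", 4), ("ible", 4), ("ful", 3), ("less", 4)]

-- ===== PORT B =====
-- the module-level set _SUFFIXES of Source B
def pvSuffixSet : PySem.Set String :=
  PySem.Set.ofList ["ing", "ed", "er", "est", "ly", "tion", "ness", "ment",
                    "able", "ible", "ful", "less"]

-- the 'for k in (4, 3, 2)' loop with its early return
def pvStemLoopB (w : String) : List Int → String
  | [] => w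
  | k :: rest =>
      if decide (k < PySem.Str.len w) && decide (PySem.Str.slice w (some (-k)) none ∈ pvSuffixSet) then
        PySem.Str.slice w none (some (-k))
      else pvStemLoopB w rest

def simple_stem_alt (word : String) : String :=
  let w := PySem.Str.lower word
  if PySem.Str.len w ≤ 3 then w
  else pvStemLoopB w [4, 3, 2]

-- ===== PRECONDITION & SPEC =====
def Spec_simple_stem (word : String) (out : String) : Prop := out = simple_stem_alt word
instance (word : String) (out : String) : Decidable (Spec_simple_stem word out) := by unfold Spec_simple_stem; infer_instance

-- ===== CLAIM (what is proved, stated in full; the proofs are below) =====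
def Claim_equal_simple_stem : Prop := ∀ (word : String), Dom_simple_stem word → Spec_simple_stem word (simple_stem word)

-- ===== LEMMAS AND PROOFS =====

-- a word's slice w[-k:] equals s iff s has length k and w ends with s
lemma pv_slice_eq (w : String) (k : Nat) (hk1 : 0 < k) (hkn : k ≤ w.toList.length) (s : String) :
    (PySem.Str.slice w (some (-(k : Int))) none = s) ↔
      (s.toList.length = k ∧ PySem.Str.endswith w s = true) := by
  rw [← String.toList_inj, PySem.Str.toList_slice, PySem.Chars.slice_eq_listSlice,
      PySem.List.slice_from_neg_natCast _ k hk1]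
  constructor
  · intro h
    refine ⟨?_, ?_⟩
    · rw [← h]; simp only [List.length_drop]; omega
    · simp only [PySem.Str.endswith, PySem.Chars.endswith, List.isSuffixOf_iff_suffix]
      rw [← h]
      
      exact List.drop_suffix _ _
  · rintro ⟨hl, he⟩
    have hs : s.toList <:+ w.toList := by
      simpa only [PySem.Str.endswith, PySem.Chars.endswith, List.isSuffixOf_iff_suffix,
        decide_eq_true_eq] using he
    rw [List.suffix_iff_eq_drop, hl] at hs
    exact hs.symm

-- two suffixes of the same word are comparable; a string incomparable with a known suffix is not one
lemma pv_excl (w s t : String) (hs : PySem.Str.endswith w s = true)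
    (h1 : ¬ s.toList <:+ t.toList) (h2 : ¬ t.toList <:+ s.toList) :
    PySem.Str.endswith w t = false := by
  cases e : PySem.Str.endswith w t with
  | false => rfl
  | true =>
    have hs' : s.toList <:+ w.toList := by
      simpa only [PySem.Str.endswith, PySem.Chars.endswith, List.isSuffixOf_iff_suffix,
        decide_eq_true_eq] using hs
    have ht' : t.toList <:+ w.toList := by
      simpa only [PySem.Str.endswith, PySem.Chars.endswith, List.isSuffixOf_iff_suffix,
        decide_eq_true_eq] using e
    rcases le_total s.toList.length t.toList.length with hle | hle
    · exact absurd (List.suffix_of_suffix_length_le hs' ht' hle) h1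
    · exact absurd (List.suffix_of_suffix_length_le ht' hs' hle) h2

lemma pv_mem4 (w : String) (h : 4 < w.toList.length) :
    (PySem.Str.slice w (some (-4)) none ∈ pvSuffixSet) ↔
      (PySem.Str.endswith w "tion" = true ∨ PySem.Str.endswith w "ness" = true ∨
       PySem.Str.endswith w "ment" = true ∨ PySem.Str.endswith w "able" = true ∨
       PySem.Str.endswith w "ible" = true ∨ PySem.Str.endswith w "less" = true) := by
  have e : (-4 : Int) = -((4 : Nat) : Int) := by norm_num
  rw [e, pvSuffixSet, PySem.Set.mem_ofList]
  simp only [List.mem_cons, List.not_mem_nil, or_false,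
    pv_slice_eq w 4 (by norm_num) (by omega)]
  simp

lemma pv_mem3 (w : String) (h : 3 < w.toList.length) :
    (PySem.Str.slice w (some (-3)) none ∈ pvSuffixSet) ↔
      (PySem.Str.endswith w "ing" = true ∨ PySem.Str.endswith w "est" = true ∨
       PySem.Str.endswith w "ful" = true) := by
  have e : (-3 : Int) = -((3 : Nat) : Int) := by norm_num
  rw [e, pvSuffixSet, PySem.Set.mem_ofList]
  simp only [List.mem_cons, List.not_mem_nil, or_false,
    pv_slice_eq w 3 (by norm_num) (by omega)]
  simp

lemma pv_mem2 (w : String) (h : 2 < w.toList.length) :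
    (PySem.Str.slice w (some (-2)) none ∈ pvSuffixSet) ↔
      (PySem.Str.endswith w "ed" = true ∨ PySem.Str.endswith w "er" = true ∨
       PySem.Str.endswith w "ly" = true) := by
  have e : (-2 : Int) = -((2 : Nat) : Int) := by norm_num
  rw [e, pvSuffixSet, PySem.Set.mem_ofList]
  simp only [List.mem_cons, List.not_mem_nil, or_false,
    pv_slice_eq w 2 (by norm_num) (by omega)]
  simp

lemma pv_B4_false (w : String)
    (h1 : PySem.Str.endswith w "tion" = false) (h2 : PySem.Str.endswith w "ness" = false)
    (h3 : PySem.Str.endswith w "ment" = false) (h4 : PySem.Str.endswith w "able" = false)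
    (h5 : PySem.Str.endswith w "ible" = false) (h6 : PySem.Str.endswith w "less" = false) :
    (decide ((4 : Int) < PySem.Str.len w) && decide (PySem.Str.slice w (some (-4)) none ∈ pvSuffixSet)) = false := by
  by_cases hg : (4 : Int) < PySem.Str.len w
  · have hg' : 4 < w.toList.length := by
      have := PySem.Str.len_eq w; omega
    have : decide (PySem.Str.slice w (some (-4)) none ∈ pvSuffixSet) = false := by
      rw [decide_eq_false_iff_not, pv_mem4 w hg']
      simp only [h1, h2, h3, h4, h5, h6]
      simp
    simp [this]
  · have hgf : decide ((4 : Int) < PySem.Str.len w) = false := by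
      simp only [decide_eq_false_iff_not]; exact hg
    rw [hgf, Bool.false_and]

lemma pv_core (w : String) (hn : 3 < w.toList.length) :
    pvStemLoopA w
      [("ing", 3), ("ed", 2), ("er", 2), ("est", 3),
       ("ly", 2), ("tion", 4), ("ness", 4), ("ment", 4),
       ("able", 4), ("ible", 4), ("ful", 3), ("less", 4)] = pvStemLoopB w [4, 3, 2] := by
  have hlen : PySem.Str.len w = (w.toList.length : Int) := PySem.Str.len_eq w
  have g2 : decide ((2 : Int) < PySem.Str.len w) = true := by
    simp only [hlen, decide_eq_true_eq]; omega
  have g3 : decide ((3 : Int) < PySem.Str.len w) = true := by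
    simp only [hlen, decide_eq_true_eq]; omega
  simp only [pvStemLoopA, pvStemLoopB, g2, g3, Bool.true_and, (show PySem.Str.len "ing" = 3 from rfl), (show PySem.Str.len "ed" = 2 from rfl), (show PySem.Str.len "er" = 2 from rfl), (show PySem.Str.len "est" = 3 from rfl), (show PySem.Str.len "ly" = 2 from rfl), (show PySem.Str.len "tion" = 4 from rfl), (show PySem.Str.len "ness" = 4 from rfl), (show PySem.Str.len "ment" = 4 from rfl), (show PySem.Str.len "able" = 4 from rfl), (show PySem.Str.len "ible" = 4 from rfl), (show PySem.Str.len "ful" = 3 from rfl), (show PySem.Str.len "less" = 4 from rfl)]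
  cases hing : PySem.Str.endswith w "ing" with
  | true =>
    have hxtion : PySem.Str.endswith w "tion" = false := pv_excl w "ing" "tion" hing (by decide) (by decide)
    have hxness : PySem.Str.endswith w "ness" = false := pv_excl w "ing" "ness" hing (by decide) (by decide)
    have hxment : PySem.Str.endswith w "ment" = false := pv_excl w "ing" "ment" hing (by decide) (by decide)
    have hxable : PySem.Str.endswith w "able" = false := pv_excl w "ing" "able" hing (by decide) (by decide)
    have hxible : PySem.Str.endswith w "ible" = false := pv_excl w "ing" "ible" hing (by decide) (by decide)
    have hxless : PySem.Str.endswith w "less" = false := pv_excl w "ing" "less" hing (by decide) (by decide)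
    have hB4 : (decide ((4 : Int) < PySem.Str.len w) && decide (PySem.Str.slice w (some (-4)) none ∈ pvSuffixSet)) = false :=
      pv_B4_false w hxtion hxness hxment hxable hxible hxless
    have hm3 : decide (PySem.Str.slice w (some (-3)) none ∈ pvSuffixSet) = true :=
      decide_eq_true ((pv_mem3 w hn).mpr (Or.inl hing))
    simp only [hB4, hm3]
    simp
  | false =>
    cases hed : PySem.Str.endswith w "ed" with
    | true =>
      have hxtion : PySem.Str.endswith w "tion" = false := pv_excl w "ed" "tion" hed (by decide) (by decide)
      have hxness : PySem.Str.endswith w "ness" = false := pv_excl w "ed" "ness" hed (by decide) (by decide)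
      have hxment : PySem.Str.endswith w "ment" = false := pv_excl w "ed" "ment" hed (by decide) (by decide)
      have hxable : PySem.Str.endswith w "able" = false := pv_excl w "ed" "able" hed (by decide) (by decide)
      have hxible : PySem.Str.endswith w "ible" = false := pv_excl w "ed" "ible" hed (by decide) (by decide)
      have hxless : PySem.Str.endswith w "less" = false := pv_excl w "ed" "less" hed (by decide) (by decide)
      have hB4 : (decide ((4 : Int) < PySem.Str.len w) && decide (PySem.Str.slice w (some (-4)) none ∈ pvSuffixSet)) = false :=
        pv_B4_false w hxtion hxness hxment hxable hxible hxless
      have hxest : PySem.Str.endswith w "est" = false := pv_excl w "ed" "est" hed (by decide) (by decide)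
      have hxful : PySem.Str.endswith w "ful" = false := pv_excl w "ed" "ful" hed (by decide) (by decide)
      have hB3 : decide (PySem.Str.slice w (some (-3)) none ∈ pvSuffixSet) = false := by
        rw [decide_eq_false_iff_not, pv_mem3 w hn]
        simp only [hing, hxest, hxful]
        simp
      have hm2 : decide (PySem.Str.slice w (some (-2)) none ∈ pvSuffixSet) = true :=
        decide_eq_true ((pv_mem2 w (by omega)).mpr (Or.inl hed))
      simp only [hB4, hB3, hm2]
      simp
    | false =>
      cases her : PySem.Str.endswith w "er" with
      | true =>
        have hxtion : PySem.Str.endswith w "tion" = false := pv_excl w "er" "tion" her (by decide) (by decide)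
        have hxness : PySem.Str.endswith w "ness" = false := pv_excl w "er" "ness" her (by decide) (by decide)
        have hxment : PySem.Str.endswith w "ment" = false := pv_excl w "er" "ment" her (by decide) (by decide)
        have hxable : PySem.Str.endswith w "able" = false := pv_excl w "er" "able" her (by decide) (by decide)
        have hxible : PySem.Str.endswith w "ible" = false := pv_excl w "er" "ible" her (by decide) (by decide)
        have hxless : PySem.Str.endswith w "less" = false := pv_excl w "er" "less" her (by decide) (by decide)
        have hB4 : (decide ((4 : Int) < PySem.Str.len w) && decide (PySem.Str.slice w (some (-4)) none ∈ pvSuffixSet)) = false :=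
          pv_B4_false w hxtion hxness hxment hxable hxible hxless
        have hxest : PySem.Str.endswith w "est" = false := pv_excl w "er" "est" her (by decide) (by decide)
        have hxful : PySem.Str.endswith w "ful" = false := pv_excl w "er" "ful" her (by decide) (by decide)
        have hB3 : decide (PySem.Str.slice w (some (-3)) none ∈ pvSuffixSet) = false := by
          rw [decide_eq_false_iff_not, pv_mem3 w hn]
          simp only [hing, hxest, hxful]
          simp
        have hm2 : decide (PySem.Str.slice w (some (-2)) none ∈ pvSuffixSet) = true :=
          decide_eq_true ((pv_mem2 w (by omega)).mpr (Or.inr (Or.inl her)))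
        simp only [hB4, hB3, hm2]
        simp
      | false =>
        cases hest : PySem.Str.endswith w "est" with
        | true =>
          have hxtion : PySem.Str.endswith w "tion" = false := pv_excl w "est" "tion" hest (by decide) (by decide)
          have hxness : PySem.Str.endswith w "ness" = false := pv_excl w "est" "ness" hest (by decide) (by decide)
          have hxment : PySem.Str.endswith w "ment" = false := pv_excl w "est" "ment" hest (by decide) (by decide)
          have hxable : PySem.Str.endswith w "able" = false := pv_excl w "est" "able" hest (by decide) (by decide)
          have hxible : PySem.Str.endswith w "ible" = false := pv_excl w "est" "ible" hest (by decide) (by decide)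
          have hxless : PySem.Str.endswith w "less" = false := pv_excl w "est" "less" hest (by decide) (by decide)
          have hB4 : (decide ((4 : Int) < PySem.Str.len w) && decide (PySem.Str.slice w (some (-4)) none ∈ pvSuffixSet)) = false :=
            pv_B4_false w hxtion hxness hxment hxable hxible hxless
          have hm3 : decide (PySem.Str.slice w (some (-3)) none ∈ pvSuffixSet) = true :=
            decide_eq_true ((pv_mem3 w hn).mpr (Or.inr (Or.inl hest)))
          simp only [hB4, hm3]
          simp
        | false =>
          cases hly : PySem.Str.endswith w "ly" with
          | true =>
            have hxtion : PySem.Str.endswith w "tion" = false := pv_excl w "ly" "tion" hly (by decide) (by decide)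
            have hxness : PySem.Str.endswith w "ness" = false := pv_excl w "ly" "ness" hly (by decide) (by decide)
            have hxment : PySem.Str.endswith w "ment" = false := pv_excl w "ly" "ment" hly (by decide) (by decide)
            have hxable : PySem.Str.endswith w "able" = false := pv_excl w "ly" "able" hly (by decide) (by decide)
            have hxible : PySem.Str.endswith w "ible" = false := pv_excl w "ly" "ible" hly (by decide) (by decide)
            have hxless : PySem.Str.endswith w "less" = false := pv_excl w "ly" "less" hly (by decide) (by decide)
            have hB4 : (decide ((4 : Int) < PySem.Str.len w) && decide (PySem.Str.slice w (some (-4)) none ∈ pvSuffixSet)) = false :=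
              pv_B4_false w hxtion hxness hxment hxable hxible hxless
            have hxful : PySem.Str.endswith w "ful" = false := pv_excl w "ly" "ful" hly (by decide) (by decide)
            have hB3 : decide (PySem.Str.slice w (some (-3)) none ∈ pvSuffixSet) = false := by
              rw [decide_eq_false_iff_not, pv_mem3 w hn]
              simp only [hing, hest, hxful]
              simp
            have hm2 : decide (PySem.Str.slice w (some (-2)) none ∈ pvSuffixSet) = true :=
              decide_eq_true ((pv_mem2 w (by omega)).mpr (Or.inr (Or.inr hly)))
            simp only [hB4, hB3, hm2]
            simp
          | false =>
            cases htion : PySem.Str.endswith w "tion" with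
            | true =>
              by_cases h4 : (4 : Int) < PySem.Str.len w
              · have h4' : 4 < w.toList.length := by omega
                have hm4 : decide (PySem.Str.slice w (some (-4)) none ∈ pvSuffixSet) = true :=
                  decide_eq_true ((pv_mem4 w h4').mpr (Or.inl htion))
                simp only [h4, hm4]
                simp
              · have g4 : decide ((4 : Int) < PySem.Str.len w) = false := by
                  simp only [decide_eq_false_iff_not]; exact h4
                have hxful : PySem.Str.endswith w "ful" = false := pv_excl w "tion" "ful" htion (by decide) (by decide)
                have hB3 : decide (PySem.Str.slice w (some (-3)) none ∈ pvSuffixSet) = false := by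
                  rw [decide_eq_false_iff_not, pv_mem3 w hn]
                  simp only [hing, hest, hxful]
                  simp
                have hB2 : decide (PySem.Str.slice w (some (-2)) none ∈ pvSuffixSet) = false := by
                  rw [decide_eq_false_iff_not, pv_mem2 w (by omega)]
                  simp only [hed, her, hly]
                  simp
                simp only [g4, hxful, hB3, hB2]
                simp
            | false =>
              cases hness : PySem.Str.endswith w "ness" with
              | true =>
                by_cases h4 : (4 : Int) < PySem.Str.len w
                · have h4' : 4 < w.toList.length := by omega
                  have hm4 : decide (PySem.Str.slice w (some (-4)) none ∈ pvSuffixSet) = true :=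
                    decide_eq_true ((pv_mem4 w h4').mpr (Or.inr (Or.inl hness)))
                  simp only [h4, hm4]
                  simp
                · have g4 : decide ((4 : Int) < PySem.Str.len w) = false := by
                    simp only [decide_eq_false_iff_not]; exact h4
                  have hxful : PySem.Str.endswith w "ful" = false := pv_excl w "ness" "ful" hness (by decide) (by decide)
                  have hB3 : decide (PySem.Str.slice w (some (-3)) none ∈ pvSuffixSet) = false := by
                    rw [decide_eq_false_iff_not, pv_mem3 w hn]
                    simp only [hing, hest, hxful]
                    simp
                  have hB2 : decide (PySem.Str.slice w (some (-2)) none ∈ pvSuffixSet) = false := by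
                    rw [decide_eq_false_iff_not, pv_mem2 w (by omega)]
                    simp only [hed, her, hly]
                    simp
                  simp only [g4, hxful, hB3, hB2]
                  simp
              | false =>
                cases hment : PySem.Str.endswith w "ment" with
                | true =>
                  by_cases h4 : (4 : Int) < PySem.Str.len w
                  · have h4' : 4 < w.toList.length := by omega
                    have hm4 : decide (PySem.Str.slice w (some (-4)) none ∈ pvSuffixSet) = true :=
                      decide_eq_true ((pv_mem4 w h4').mpr (Or.inr (Or.inr (Or.inl hment))))
                    simp only [h4, hm4]
                    simp
                  · have g4 : decide ((4 : Int) < PySem.Str.len w) = false := by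
                      simp only [decide_eq_false_iff_not]; exact h4
                    have hxful : PySem.Str.endswith w "ful" = false := pv_excl w "ment" "ful" hment (by decide) (by decide)
                    have hB3 : decide (PySem.Str.slice w (some (-3)) none ∈ pvSuffixSet) = false := by
                      rw [decide_eq_false_iff_not, pv_mem3 w hn]
                      simp only [hing, hest, hxful]
                      simp
                    have hB2 : decide (PySem.Str.slice w (some (-2)) none ∈ pvSuffixSet) = false := by
                      rw [decide_eq_false_iff_not, pv_mem2 w (by omega)]
                      simp only [hed, her, hly]
                      simp
                    simp only [g4, hxful, hB3, hB2]
                    simp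
                | false =>
                  cases hable : PySem.Str.endswith w "able" with
                  | true =>
                    by_cases h4 : (4 : Int) < PySem.Str.len w
                    · have h4' : 4 < w.toList.length := by omega
                      have hm4 : decide (PySem.Str.slice w (some (-4)) none ∈ pvSuffixSet) = true :=
                        decide_eq_true ((pv_mem4 w h4').mpr (Or.inr (Or.inr (Or.inr (Or.inl hable)))))
                      simp only [h4, hm4]
                      simp
                    · have g4 : decide ((4 : Int) < PySem.Str.len w) = false := by
                        simp only [decide_eq_false_iff_not]; exact h4
                      have hxful : PySem.Str.endswith w "ful" = false := pv_excl w "able" "ful" hable (by decide) (by decide)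
                      have hB3 : decide (PySem.Str.slice w (some (-3)) none ∈ pvSuffixSet) = false := by
                        rw [decide_eq_false_iff_not, pv_mem3 w hn]
                        simp only [hing, hest, hxful]
                        simp
                      have hB2 : decide (PySem.Str.slice w (some (-2)) none ∈ pvSuffixSet) = false := by
                        rw [decide_eq_false_iff_not, pv_mem2 w (by omega)]
                        simp only [hed, her, hly]
                        simp
                      simp only [g4, hxful, hB3, hB2]
                      simp
                  | false =>
                    cases hible : PySem.Str.endswith w "ible" with
                    | true =>
                      by_cases h4 : (4 : Int) < PySem.Str.len w
                      · have h4' : 4 < w.toList.length := by omega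
                        have hm4 : decide (PySem.Str.slice w (some (-4)) none ∈ pvSuffixSet) = true :=
                          decide_eq_true ((pv_mem4 w h4').mpr (Or.inr (Or.inr (Or.inr (Or.inr (Or.inl hible))))))
                        simp only [h4, hm4]
                        simp
                      · have g4 : decide ((4 : Int) < PySem.Str.len w) = false := by
                          simp only [decide_eq_false_iff_not]; exact h4
                        have hxful : PySem.Str.endswith w "ful" = false := pv_excl w "ible" "ful" hible (by decide) (by decide)
                        have hB3 : decide (PySem.Str.slice w (some (-3)) none ∈ pvSuffixSet) = false := by
                          rw [decide_eq_false_iff_not, pv_mem3 w hn]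
                          simp only [hing, hest, hxful]
                          simp
                        have hB2 : decide (PySem.Str.slice w (some (-2)) none ∈ pvSuffixSet) = false := by
                          rw [decide_eq_false_iff_not, pv_mem2 w (by omega)]
                          simp only [hed, her, hly]
                          simp
                        simp only [g4, hxful, hB3, hB2]
                        simp
                    | false =>
                      cases hful : PySem.Str.endswith w "ful" with
                      | true =>
                        have hxless : PySem.Str.endswith w "less" = false := pv_excl w "ful" "less" hful (by decide) (by decide)
                        have hB4 : (decide ((4 : Int) < PySem.Str.len w) && decide (PySem.Str.slice w (some (-4)) none ∈ pvSuffixSet)) = false :=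
                          pv_B4_false w htion hness hment hable hible hxless
                        have hm3 : decide (PySem.Str.slice w (some (-3)) none ∈ pvSuffixSet) = true :=
                          decide_eq_true ((pv_mem3 w hn).mpr (Or.inr (Or.inr hful)))
                        simp only [hB4, hm3]
                        simp
                      | false =>
                        cases hless : PySem.Str.endswith w "less" with
                        | true =>
                          by_cases h4 : (4 : Int) < PySem.Str.len w
                          · have h4' : 4 < w.toList.length := by omega
                            have hm4 : decide (PySem.Str.slice w (some (-4)) none ∈ pvSuffixSet) = true :=
                              decide_eq_true ((pv_mem4 w h4').mpr (Or.inr (Or.inr (Or.inr (Or.inr (Or.inr hless))))))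
                            simp only [h4, hm4]
                            simp
                          · have g4 : decide ((4 : Int) < PySem.Str.len w) = false := by
                              simp only [decide_eq_false_iff_not]; exact h4
                            have hB3 : decide (PySem.Str.slice w (some (-3)) none ∈ pvSuffixSet) = false := by
                              rw [decide_eq_false_iff_not, pv_mem3 w hn]
                              simp only [hing, hest, hful]
                              simp
                            have hB2 : decide (PySem.Str.slice w (some (-2)) none ∈ pvSuffixSet) = false := by
                              rw [decide_eq_false_iff_not, pv_mem2 w (by omega)]
                              simp only [hed, her, hly]
                              simp
                            simp only [g4, hB3, hB2]
                            simp
                        | false =>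
                          have hB4 : (decide ((4 : Int) < PySem.Str.len w) && decide (PySem.Str.slice w (some (-4)) none ∈ pvSuffixSet)) = false :=
                            pv_B4_false w htion hness hment hable hible hless
                          have hB3 : decide (PySem.Str.slice w (some (-3)) none ∈ pvSuffixSet) = false := by
                            rw [decide_eq_false_iff_not, pv_mem3 w hn]
                            simp only [hing, hest, hful]
                            simp
                          have hB2 : decide (PySem.Str.slice w (some (-2)) none ∈ pvSuffixSet) = false := by
                            rw [decide_eq_false_iff_not, pv_mem2 w (by omega)]
                            simp only [hed, her, hly]
                            simp
                          simp only [hB4, hB3, hB2]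
                          simp

-- ===== VERDICT (by name: the statement is the Claim_ definition above) =====
theorem simple_stem_spec : Claim_equal_simple_stem := by
  intro word _
  unfold Spec_simple_stem simple_stem simple_stem_alt
  by_cases h : PySem.Str.len (PySem.Str.lower word) ≤ 3
  · rw [if_pos h, if_pos h]
  · rw [if_neg h, if_neg h]
    exact pv_core _ (by have := PySem.Str.len_eq (PySem.Str.lower word); omega)
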